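-- pv_equiv track=rewrite | github.com/fridayunuen/DataScience-CONNECT | MappingAndBeyond/aux_mapping_items.py | extract_sku
-- ===== SOURCE A (Python) =====
-- def extract_sku(string, largo=10):
--     # sku is a string of 10 digits togheter in a string
--     sku, sku_10 = "", "0"
--     i_ant = 0
--     for i in range(len(string)):
--         if string[i].isdigit():
--             if i_ant == i-1:
--                 sku += string[i]
--             else:
--                 sku = string[i]
--             i_ant = i
--             if len(sku) == largo:
--                 sku_10 = sku
--     return sku_10
-- ===== SOURCE B (Python) =====
-- def extract_sku(string, largo=10):
--     # Two-pass: segment the string into maximal digit runs, then keep the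
--     # largo-prefix of the last run of length >= largo ("0" if none).
--     result = "0"
--     runs = []
--     cur = ""
--     for ch in string:
--         if ch.isdigit():
--             cur += ch
--         else:
--             if cur:
--                 runs.append(cur)
--             cur = ""
--     if cur:
--         runs.append(cur)
--     if largo >= 1:
--         for run in runs:
--             if len(run) >= largo:
--                 result = run[:largo]
--     return result
-- ===== Notes on version B (the rewrite author's own statement) =====
-- stated objective: alternative
-- what changed: Replaces the inline index/previous-index (i_ant) accumulator with a two-pass scheme: segment the string into maximal digit runs, then take the largo-prefix of the last run of length >= largo.
import Mathlib
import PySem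

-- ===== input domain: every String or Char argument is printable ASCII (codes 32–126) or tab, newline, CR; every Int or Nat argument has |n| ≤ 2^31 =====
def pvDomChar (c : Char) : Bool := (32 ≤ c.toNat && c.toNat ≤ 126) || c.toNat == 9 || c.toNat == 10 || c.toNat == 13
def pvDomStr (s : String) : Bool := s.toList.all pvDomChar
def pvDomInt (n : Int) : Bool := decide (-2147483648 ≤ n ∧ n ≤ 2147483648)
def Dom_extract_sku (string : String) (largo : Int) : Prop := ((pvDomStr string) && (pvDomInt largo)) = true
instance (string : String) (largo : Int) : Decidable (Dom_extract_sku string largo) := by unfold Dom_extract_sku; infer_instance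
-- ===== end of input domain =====

-- B replaces A's inline accumulator/previous-index scan by a two-pass scheme
-- (segment into maximal digit runs, then scan the runs); objective: alternative.

-- ===== PORT A =====
-- A's `for i in range(len(string))` reading string[i] is transliterated as the
-- obvious structural recursion over the remaining characters, carrying the same
-- state (sku, sku_10, i_ant) and the index i.
def extract_sku_loop (largo : Int) : List Char → Int → List Char → List Char → Int → List Char
  | [], _, _, sku10, _ => sku10
  | c :: rest, i, sku, sku10, iant =>
    if PySem.Chars.isdigit c then
      let sku' := if iant = i - 1 then sku ++ [c] else [c]
      let iant' := i
      let sku10' := if (sku'.length : Int) = largo then sku' else sku10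
      extract_sku_loop largo rest (i + 1) sku' sku10' iant'
    else
      extract_sku_loop largo rest (i + 1) sku sku10 iant

def extract_sku (string : String) (largo : Int) : String :=
  String.ofList (extract_sku_loop largo string.toList 0 [] ['0'] 0)

-- ===== PORT B =====
-- pass 1: split into maximal digit runs (accumulator = completed runs, current run)
def extract_sku_seg : List Char → List (List Char) × List Char → List (List Char) × List Char
  | [], st => st
  | c :: rest, (runs, cur) =>
    if PySem.Chars.isdigit c then
      extract_sku_seg rest (runs, cur ++ [c])
    else
      extract_sku_seg rest (if cur ≠ [] then runs ++ [cur] else runs, [])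

-- pass 2: last run of length ≥ largo wins, prefixed to largo  (run[:largo])
def extract_sku_pick (largo : Int) (res : List Char) (run : List Char) : List Char :=
  if largo ≤ (run.length : Int) then PySem.List.slice run none (some largo) else res

def extract_sku_alt (string : String) (largo : Int) : String :=
  let st := extract_sku_seg string.toList ([], [])
  let runs := if st.2 ≠ [] then st.1 ++ [st.2] else st.1
  String.ofList (if 1 ≤ largo then runs.foldl (extract_sku_pick largo) ['0'] else ['0'])

-- ===== PRECONDITION & SPEC =====
def Spec_extract_sku (string : String) (largo : Int) (out : String) : Prop := out = extract_sku_alt string largo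
instance (string : String) (largo : Int) (out : String) : Decidable (Spec_extract_sku string largo out) := by unfold Spec_extract_sku; infer_instance

-- ===== CLAIM (what is proved, stated in full; the proofs are below) =====
def Claim_equal_extract_sku : Prop := ∀ (string : String) (largo : Int), Dom_extract_sku string largo → Spec_extract_sku string largo (extract_sku string largo)

-- ===== LEMMAS AND PROOFS =====

-- For largo ≤ 0 the update `len(sku) == largo` can never fire (len ≥ 1), so A keeps '0'.
lemma extract_sku_loop_nonpos (largo : Int) (hl : largo ≤ 0) :
    ∀ (t : List Char) (i : Int) (sku : List Char) (iant : Int),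
      extract_sku_loop largo t i sku ['0'] iant = ['0'] := by
  intro t
  induction t with
  | nil => intro i sku iant; rfl
  | cons c rest ih =>
    intro i sku iant
    by_cases hd : PySem.Chars.isdigit c = true
    · have hne : ¬ (((if iant = i - 1 then sku ++ [c] else [c]).length : Int) = largo) := by
        split_ifs <;> simp <;> omega
      simp [extract_sku_loop, hd, hne, ih]
    · simp [extract_sku_loop, hd, ih]

-- Main invariant: A's loop state after some prefix corresponds to B's
-- segmentation state (runs, cur) of that prefix.
lemma extract_sku_loop_eq (largo : Int) (hl : 1 ≤ largo) :
    ∀ (t : List Char) (i iant : Int) (sku sku10 : List Char)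
      (runs : List (List Char)) (cur : List Char),
      (cur ≠ [] → sku = cur ∧ iant = i - 1) →
      (iant = i - 1 → cur ≠ [] ∨ sku = []) →
      (iant ≤ i - 1 ∨ (i = 0 ∧ iant = 0 ∧ sku = [])) →
      sku10 = extract_sku_pick largo (runs.foldl (extract_sku_pick largo) ['0']) cur →
      extract_sku_loop largo t i sku sku10 iant =
        (let st := extract_sku_seg t (runs, cur)
         (if st.2 ≠ [] then st.1 ++ [st.2] else st.1).foldl (extract_sku_pick largo) ['0']) := by
  intro t
  induction t with
  | nil =>
    intro i iant sku sku10 runs cur h1 h2 h3 h5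
    by_cases hc : cur = []
    · subst hc
      simp [extract_sku_loop, extract_sku_seg, h5, extract_sku_pick]
      omega
    · simp [extract_sku_loop, extract_sku_seg, hc, h5]
  | cons c rest ih =>
    intro i iant sku sku10 runs cur h1 h2 h3 h5
    by_cases hd : PySem.Chars.isdigit c = true
    · -- digit step: new current run is cur ++ [c]
      have hsku' : (if iant = i - 1 then sku ++ [c] else [c]) = cur ++ [c] := by
        by_cases hc : cur = []
        · subst hc
          split_ifs with hi
          · rcases h2 hi with h | h
            · exact absurd rfl h
            · simp [h]
          · simp
        · rcases h1 hc with ⟨hs, hi⟩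
          simp [hi, hs]
      have hnew : (if (((cur ++ [c]).length : Int) = largo) then cur ++ [c] else sku10)
          = extract_sku_pick largo (runs.foldl (extract_sku_pick largo) ['0']) (cur ++ [c]) := by
        simp only [extract_sku_pick, h5]
        by_cases he : ((cur ++ [c]).length : Int) = largo
        · -- the run reaches exactly length largo: both sides are cur ++ [c]
          have hs : PySem.List.slice (cur ++ [c]) none (some largo) = cur ++ [c] := by
            rw [PySem.List.slice_to _ (by omega)]
            apply List.take_of_length_le
            simp at he ⊢
            omega
          rw [if_pos he, if_pos (le_of_eq he.symm), hs]
        · by_cases hge : largo ≤ ((cur ++ [c]).length : Int)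
          · -- already past largo: the largo-prefix is unchanged by appending c
            have hcl : largo ≤ (cur.length : Int) := by simp at he hge ⊢; omega
            have hsl : PySem.List.slice (cur ++ [c]) none (some largo)
                = PySem.List.slice cur none (some largo) := by
              rw [PySem.List.slice_to _ (by omega), PySem.List.slice_to _ (by omega)]
              apply List.take_append_of_le_length
              omega
            rw [if_neg he, if_pos hge, if_pos hcl, hsl]
          · -- still short: result untouched on both sides
            have hcl : ¬ largo ≤ (cur.length : Int) := by simp at hge ⊢; omega
            rw [if_neg he, if_neg hge, if_neg hcl]
      simp only [extract_sku_loop, hd, if_true]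
      rw [show extract_sku_seg (c :: rest) (runs, cur)
            = extract_sku_seg rest (runs, cur ++ [c]) by simp [extract_sku_seg, hd]]
      rw [hsku', hnew]
      exact ih (i + 1) i (cur ++ [c]) _ runs (cur ++ [c])
        (fun _ => ⟨rfl, by omega⟩) (fun _ => Or.inl (by simp))
        (Or.inl (by omega)) rfl
    · -- non-digit step: current run (if any) is flushed
      have hflush : extract_sku_seg (c :: rest) (runs, cur)
          = extract_sku_seg rest ((if cur ≠ [] then runs ++ [cur] else runs), []) := by
        simp [extract_sku_seg, hd]
      have h5' : sku10 = extract_sku_pick largo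
          (((if cur ≠ [] then runs ++ [cur] else runs)).foldl (extract_sku_pick largo) ['0']) [] := by
        by_cases hc : cur = []
        · subst hc; simpa using h5
        · simp [hc, h5, extract_sku_pick]
          omega
      have hsku0 : iant = i → sku = [] := by
        intro hi
        rcases h3 with h | ⟨hi0, _, hs⟩
        · omega
        · exact hs
      simp only [extract_sku_loop, hd, if_false, Bool.false_eq_true]
      rw [hflush]
      exact ih (i + 1) iant sku sku10 (if cur ≠ [] then runs ++ [cur] else runs) []
        (fun h => absurd rfl h)
        (fun hi => Or.inr (hsku0 (by omega)))
        (Or.inl (by rcases h3 with h | ⟨hi0, hia, _⟩ <;> omega))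
        h5'

-- ===== VERDICT (by name: the statement is the Claim_ definition above) =====
theorem extract_sku_spec : Claim_equal_extract_sku := by
  intro s largo _
  unfold Spec_extract_sku extract_sku extract_sku_alt
  by_cases hl : 1 ≤ largo
  · have := extract_sku_loop_eq largo hl s.toList 0 0 [] ['0'] [] []
      (fun h => absurd rfl h) (by omega) (Or.inr ⟨rfl, rfl, rfl⟩)
      (by simp [extract_sku_pick]; omega)
    simp only [hl, if_true]
    rw [this]
  · have h0 := extract_sku_loop_nonpos largo (by omega) s.toList 0 [] 0
    simp [hl, h0]
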